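-- pv_equiv track=rewrite | github.com/research-team/memristive-brain | scripts for anything/graph_plot_new.py | spikesArray
-- ===== SOURCE A (Python) =====
-- def spikesArray(chan):
--     LOW_LEVEL = 3
--     temp = 0
--     flag = False
--     return_arr = []
--     for x in range(len(chan)):
--         if (chan[x] > LOW_LEVEL):
--             flag = True
--         if (chan[x] < LOW_LEVEL and flag):
--             flag = False
--             temp += 1
--         return_arr.append(temp)
--
--     return return_arr
-- ===== SOURCE B (Python) =====
-- def spikesArray(chan):
--     LOW_LEVEL = 3
--     # Off-threshold samples, tagged high/low (ties at LOW_LEVEL carry no information).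
--     sig = [(i, v > LOW_LEVEL) for i, v in enumerate(chan) if v != LOW_LEVEL]
--     # A spike fires at a low sample whose nearest off-threshold predecessor is high.
--     spikes = [cur_i for (_, prev_hi), (cur_i, cur_hi) in zip(sig, sig[1:])
--               if prev_hi and not cur_hi]
--     # Expand the sorted spike positions into a running count per index.
--     out = []
--     k = 0
--     for i in range(len(chan)):
--         if k < len(spikes) and spikes[k] == i:
--             k += 1
--         out.append(k)
--     return out
-- ===== Notes on version B (the rewrite author's own statement) =====
-- stated objective: alternative
-- what changed: B drops A's online flag/counter state machine: it filters the off-threshold samples with their indices, detects spikes as high-then-low adjacent pairs of that subsequence via zip, and expands the resulting sorted spike positions into the per-index running count.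
import Mathlib
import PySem

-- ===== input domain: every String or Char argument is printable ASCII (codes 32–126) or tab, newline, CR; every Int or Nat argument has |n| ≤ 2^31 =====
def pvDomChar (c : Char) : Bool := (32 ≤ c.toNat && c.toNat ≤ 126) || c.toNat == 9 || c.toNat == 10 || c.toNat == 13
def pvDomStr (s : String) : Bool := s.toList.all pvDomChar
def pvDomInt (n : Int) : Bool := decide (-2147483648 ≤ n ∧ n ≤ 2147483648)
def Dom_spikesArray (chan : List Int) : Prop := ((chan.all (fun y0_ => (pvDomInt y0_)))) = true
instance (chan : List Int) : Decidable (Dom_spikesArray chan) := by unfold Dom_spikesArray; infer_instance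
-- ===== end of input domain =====

-- B replaces A's online flag/counter loop by an offline pipeline: filter the off-threshold samples,
-- detect spikes as high→low adjacent pairs of that subsequence, then expand the sorted spike
-- positions into the running count (alternative decomposition, same cost).

-- ===== PORT A =====
def spikesStep (s : Int × Bool × List Int) (c : Int) : Int × Bool × List Int :=
  let flag := if c > 3 then true else s.2.1
  if c < 3 ∧ flag = true then (s.1 + 1, false, s.2.2 ++ [s.1 + 1])
  else (s.1, flag, s.2.2 ++ [s.1])

def spikesArray (chan : List Int) : List Int :=
  (chan.foldl spikesStep (0, false, [])).2.2

-- ===== PORT B =====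
-- sig = [(i, v > 3) for i, v in enumerate(chan) if v != 3]
def spikesSig (chan : List Int) : List (Int × Bool) :=
  (PySem.List.enumerate chan).filterMap
    (fun p => if p.2 ≠ 3 then some (p.1, decide (3 < p.2)) else none)

-- spikes = [cur_i for (_, prev_hi), (cur_i, cur_hi) in zip(sig, sig[1:]) if prev_hi and not cur_hi]
def spikesList (chan : List Int) : List Int :=
  ((spikesSig chan).zip (PySem.List.slice (spikesSig chan) (some 1) none)).filterMap
    (fun q => if q.1.2 = true ∧ q.2.2 = false then some q.2.1 else none)

-- the expansion loop: walk the indices, consuming the sorted spike positions in order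
def spikesExpand : List Int → List Int → Int → List Int
  | _, [], _ => []
  | [], _ :: r, k => k :: spikesExpand [] r k
  | s :: rest, i :: r, k =>
    if s = i then (k + 1) :: spikesExpand rest r (k + 1)
    else k :: spikesExpand (s :: rest) r k

def spikesArray_alt (chan : List Int) : List Int :=
  spikesExpand (spikesList chan) (PySem.List.pyRange 0 chan.length 1) 0

-- ===== PRECONDITION & SPEC =====
def Spec_spikesArray (chan : List Int) (out : List Int) : Prop := out = spikesArray_alt chan
instance (chan : List Int) (out : List Int) : Decidable (Spec_spikesArray chan out) := by unfold Spec_spikesArray; infer_instance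

-- ===== CLAIM (what is proved, stated in full; the proofs are below) =====
def Claim_equal_spikesArray : Prop := ∀ (chan : List Int), Dom_spikesArray chan → Spec_spikesArray chan (spikesArray chan)

-- ===== LEMMAS AND PROOFS =====

-- reference recursion: A's state machine written structurally
def ARec : List Int → Bool → Int → List Int
  | [], _, _ => []
  | c :: r, flag, t =>
    let flag1 := if 3 < c then true else flag
    if c < 3 ∧ flag1 = true then (t + 1) :: ARec r false (t + 1)
    else t :: ARec r flag1 t

theorem spikesArray_foldl (chan : List Int) (temp : Int) (flag : Bool) (acc : List Int) :
    (chan.foldl spikesStep (temp, flag, acc)).2.2 = acc ++ ARec chan flag temp := by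
  induction chan generalizing temp flag acc with
  | nil => simp [ARec]
  | cons c r ih =>
    rw [List.foldl_cons]
    by_cases h1 : 3 < c
    · have h2 : ¬ c < 3 := by omega
      have : spikesStep (temp, flag, acc) c = (temp, true, acc ++ [temp]) := by
        simp [spikesStep, h1, h2]
      rw [this, ih]; simp [ARec, h1, h2]
    · by_cases h2 : c < 3
      · cases flag
        · have : spikesStep (temp, false, acc) c = (temp, false, acc ++ [temp]) := by
            simp [spikesStep, h1, h2]
          rw [this, ih]; simp [ARec, h1, h2]
        · have : spikesStep (temp, true, acc) c = (temp + 1, false, acc ++ [temp + 1]) := by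
            simp [spikesStep, h1, h2]
          rw [this, ih]; simp [ARec, h1, h2]
      · have : spikesStep (temp, flag, acc) c = (temp, flag, acc ++ [temp]) := by
          simp [spikesStep, h1, h2]
        rw [this, ih]; simp [ARec, h1, h2]

-- the filtered sig subsequence, started at an arbitrary index
def sigF (chan : List Int) (s : Int) : List (Int × Bool) :=
  (PySem.List.enumerate chan s).filterMap
    (fun p => if p.2 ≠ 3 then some (p.1, decide (3 < p.2)) else none)

theorem spikesSig_eq (chan : List Int) : spikesSig chan = sigF chan 0 := rfl

theorem sigF_cons (c : Int) (r : List Int) (s : Int) :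
    sigF (c :: r) s = if c ≠ 3 then (s, decide (3 < c)) :: sigF r (s + 1) else sigF r (s + 1) := by
  by_cases h : c = 3 <;> simp [sigF, PySem.List.enumerate_cons, h]

-- the zip(sig, sig[1:]) detection rewritten as a structural scan carrying the previous tag
def pairSpikesB (prev : Bool) : List (Int × Bool) → List Int
  | [] => []
  | q :: r => if prev = true ∧ q.2 = false then q.1 :: pairSpikesB q.2 r else pairSpikesB q.2 r

theorem zip_pairs (l : List (Int × Bool)) : ∀ p : Int × Bool,
    ((p :: l).zip l).filterMap
      (fun q => if q.1.2 = true ∧ q.2.2 = false then some q.2.1 else none)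
      = pairSpikesB p.2 l := by
  induction l with
  | nil => intro p; simp [pairSpikesB]
  | cons q r ih =>
    intro p
    simp only [List.zip_cons_cons, List.filterMap_cons, pairSpikesB, ih q]
    by_cases h : p.2 = true ∧ q.2 = false <;> simp [h]

theorem spikesList_eq (chan : List Int) :
    spikesList chan = pairSpikesB false (sigF chan 0) := by
  unfold spikesList
  rw [PySem.List.slice_from_one, spikesSig_eq]
  cases h : sigF chan 0 with
  | nil => rfl
  | cons p l =>
    rw [List.tail_cons, zip_pairs l p]
    cases l with
    | nil => rfl
    | cons q r => rfl

theorem pairSpikesB_ge (chan : List Int) : ∀ (s : Int) (prev : Bool) (x : Int),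
    x ∈ pairSpikesB prev (sigF chan s) → s ≤ x := by
  induction chan with
  | nil => intro s prev x hx; simp [sigF, PySem.List.enumerate_nil, pairSpikesB] at hx
  | cons c r ih =>
    intro s prev x hx
    rw [sigF_cons] at hx
    by_cases h : c = 3
    · simp [h] at hx
      have := ih (s + 1) prev x hx; omega
    · simp only [h, if_pos, ne_eq, not_false_iff] at hx
      unfold pairSpikesB at hx
      by_cases hc : prev = true ∧ (decide (3 < c)) = false
      · rw [if_pos hc] at hx
        rcases List.mem_cons.mp hx with h1 | h2
        · omega
        · have := ih (s + 1) _ x h2; omega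
      · rw [if_neg hc] at hx
        have := ih (s + 1) _ x hx; omega

theorem expand_eq (chan : List Int) : ∀ (s : Int) (prev : Bool) (t : Int),
    spikesExpand (pairSpikesB prev (sigF chan s))
      (PySem.List.pyRange s (s + chan.length) 1) t = ARec chan prev t := by
  induction chan with
  | nil =>
    intro s prev t
    simp [sigF, PySem.List.enumerate_nil, pairSpikesB, ARec, spikesExpand]
  | cons c r ih =>
    intro s prev t
    have hlen : s < s + ((c :: r).length : Int) := by
      have : (0:Int) < ((c :: r).length : Int) := by exact_mod_cast Nat.succ_pos r.length
      omega
    rw [PySem.List.pyRange_one_cons hlen]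
    have hend : s + ((c :: r).length : Int) = (s + 1) + (r.length : Int) := by
      simp [List.length_cons]; omega
    rw [hend, sigF_cons]
    -- generic step: if the head spike (if any) is beyond s, expand emits t and recurses
    have skip : ∀ (sp : List Int), (∀ x ∈ sp, s + 1 ≤ x) →
        spikesExpand sp (s :: PySem.List.pyRange (s + 1) (s + 1 + (r.length : Int)) 1) t
          = t :: spikesExpand sp (PySem.List.pyRange (s + 1) (s + 1 + (r.length : Int)) 1) t := by
      intro sp hsp
      cases sp with
      | nil => rfl
      | cons a rest =>
        have : ¬ a = s := by have := hsp a (List.mem_cons_self ..); omega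
        simp [spikesExpand, this]
    by_cases h : c = 3
    · -- tie: no sig element, state unchanged
      rw [if_neg (by simp [h])]
      rw [skip _ (fun x hx => pairSpikesB_ge r (s + 1) prev x hx), ih]
      have h1 : ¬ 3 < c := by omega
      have h2 : ¬ c < 3 := by omega
      simp [ARec, h1, h2]
    · rw [if_pos h]
      unfold pairSpikesB
      by_cases hc : prev = true ∧ (decide (3 < c)) = false
      · -- spike fires at index s
        rw [if_pos hc]
        have hlow : c < 3 := by
          rcases hc with ⟨_, hf⟩; simp at hf; omega
        simp only [spikesExpand]
        rw [ih]
        have : ¬ 3 < c := by omega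
        simp [ARec, this, hc.1, hlow]
      · -- no spike: emit t, carry the new tag (3 < c)
        rw [if_neg hc]
        rw [skip _ (fun x hx => pairSpikesB_ge r (s + 1) _ x hx), ih]
        by_cases h1 : 3 < c
        · have h2 : ¬ c < 3 := by omega
          simp [ARec, h1, h2]
        · have hlow : c < 3 := by omega
          have hp : prev = false := by
            by_contra hp
            exact hc ⟨by simpa using hp, by simp; omega⟩
          simp [ARec, h1, hlow, hp]

-- ===== VERDICT (by name: the statement is the Claim_ definition above) =====
theorem spikesArray_spec : Claim_equal_spikesArray := by
  intro chan _
  unfold Spec_spikesArray spikesArray spikesArray_alt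
  rw [spikesArray_foldl chan 0 false [], spikesList_eq]
  have := expand_eq chan 0 false 0
  simp at this ⊢
  rw [this]
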